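-- pv_equiv track=rewrite | github.com/biancaa-elenaa/CTI-C | An 1/Semestrul 1/LSD/suplimentar1.py | elimina_duplicate
-- ===== SOURCE A (Python) =====
-- def elimina_duplicate(lista):
--     if len(lista)>1:
--         if(lista[0] == lista [1]):
--             return elimina_duplicate(lista[1:])
--         else:
--             return [lista[0]] + elimina_duplicate(lista[1:])
--     else:
--         return []
-- ===== SOURCE B (Python) =====
-- def elimina_duplicate(lista):
--     return [a for a, b in zip(lista, lista[1:]) if a != b]
-- ===== Notes on version B (the rewrite author's own statement) =====
-- stated objective: faster
-- what changed: Replaces the recursion with repeated list slicing/concatenation by a single zip over adjacent pairs, keeping each element that differs from its successor (the last element is never paired, hence dropped).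
import Mathlib
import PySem

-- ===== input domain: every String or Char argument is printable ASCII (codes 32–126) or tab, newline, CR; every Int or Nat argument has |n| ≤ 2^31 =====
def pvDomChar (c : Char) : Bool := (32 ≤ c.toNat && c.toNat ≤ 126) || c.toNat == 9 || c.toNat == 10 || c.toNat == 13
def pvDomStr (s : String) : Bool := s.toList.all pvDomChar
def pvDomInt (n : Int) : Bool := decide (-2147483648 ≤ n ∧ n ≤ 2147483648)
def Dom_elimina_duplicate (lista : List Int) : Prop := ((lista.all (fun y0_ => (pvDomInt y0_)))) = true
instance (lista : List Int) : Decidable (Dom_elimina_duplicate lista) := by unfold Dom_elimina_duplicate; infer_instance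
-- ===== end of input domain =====

-- B replaces A's quadratic slice-and-concatenate recursion by one linear zip over adjacent pairs (faster, asymptotic).


-- ===== PORT A =====
-- recursion on lista; lista[0], lista[1] and the slice lista[1:] are exactly head, second, tail
def elimina_duplicate (lista : List Int) : List Int :=
  match lista with
  | a :: b :: rest =>
      if a = b then elimina_duplicate (b :: rest)
      else [a] ++ elimina_duplicate (b :: rest)
  | _ => []

-- ===== PORT B =====
-- [a for a, b in zip(lista, lista[1:]) if a != b]
def elimina_duplicate_alt (lista : List Int) : List Int :=
  ((lista.zip (PySem.List.slice lista (some 1) none)).filter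
      (fun p => p.1 ≠ p.2)).map Prod.fst

-- ===== PRECONDITION & SPEC =====
def Spec_elimina_duplicate (lista : List Int) (out : List Int) : Prop := out = elimina_duplicate_alt lista
instance (lista : List Int) (out : List Int) : Decidable (Spec_elimina_duplicate lista out) := by unfold Spec_elimina_duplicate; infer_instance

-- ===== CLAIM (what is proved, stated in full; the proofs are below) =====
def Claim_equal_elimina_duplicate : Prop := ∀ (lista : List Int), Dom_elimina_duplicate lista → Spec_elimina_duplicate lista (elimina_duplicate lista)

-- ===== LEMMAS AND PROOFS =====

theorem slice_one_eq_tail (l : List Int) : PySem.List.slice l (some 1) none = l.tail :=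
  PySem.List.slice_from_one l

theorem alt_eq (lista : List Int) :
    elimina_duplicate_alt lista =
      ((lista.zip lista.tail).filter (fun p => p.1 ≠ p.2)).map Prod.fst := by
  simp [elimina_duplicate_alt, slice_one_eq_tail]

theorem agree (lista : List Int) : elimina_duplicate lista = elimina_duplicate_alt lista := by
  rw [alt_eq]
  induction lista with
  | nil => simp [elimina_duplicate]
  | cons a t ih =>
    cases t with
    | nil => simp [elimina_duplicate]
    | cons b r =>
      by_cases h : a = b <;>
        simp [elimina_duplicate, h, List.zip, ih]

-- ===== VERDICT (by name: the statement is the Claim_ definition above) =====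
theorem elimina_duplicate_spec : Claim_equal_elimina_duplicate := by
  intro lista _
  exact agree lista
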